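-- pv_equiv track=rewrite | github.com/miliar/Code_Jam_Webscraper | solutions_python/solutions_year15_round0_nr2/1057.py | can_do_one
-- ===== SOURCE A (Python) =====
-- def can_do_one(duration, count, vals):
--     while duration > 0:
--         vals.sort()
--         if vals[-1] > duration - count:
--             vals[-1] = vals[-1] - (duration - count)
--             vals.append(duration - count)
--             count -= 1
--         else:
--             vals = [v - 1 for v in vals]
--         duration -= 1
--     return count == 0 and max(vals) <= 0
-- ===== SOURCE B (Python) =====
-- def can_do_one(duration, count, vals):
--     # Closed form: in A, d-c is invariant under splits, so (in the frame that
--     # ignores the all-decrement steps) the threshold t = duration - count is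
--     # constant and all splits happen before all decrements.
--     if duration <= 0:
--         return count == 0 and max(vals) <= 0
--     t = duration - count
--     if t <= 0:
--         return False
--     needed = sum((v - 1) // t for v in vals if v > 0)
--     return needed == count and max(min(v, t) for v in vals) <= duration - needed
-- ===== Notes on version B (the rewrite author's own statement) =====
-- stated objective: faster
-- what changed: B replaces A's minute-by-minute simulation (re-sorting and rebuilding the list every step) by a one-pass closed form: the split threshold t = duration - count is invariant under A's split steps, so B just sums the required splits (v-1)//t and compares the capped maximum against the remaining decrement budget.
import Mathlib
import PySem

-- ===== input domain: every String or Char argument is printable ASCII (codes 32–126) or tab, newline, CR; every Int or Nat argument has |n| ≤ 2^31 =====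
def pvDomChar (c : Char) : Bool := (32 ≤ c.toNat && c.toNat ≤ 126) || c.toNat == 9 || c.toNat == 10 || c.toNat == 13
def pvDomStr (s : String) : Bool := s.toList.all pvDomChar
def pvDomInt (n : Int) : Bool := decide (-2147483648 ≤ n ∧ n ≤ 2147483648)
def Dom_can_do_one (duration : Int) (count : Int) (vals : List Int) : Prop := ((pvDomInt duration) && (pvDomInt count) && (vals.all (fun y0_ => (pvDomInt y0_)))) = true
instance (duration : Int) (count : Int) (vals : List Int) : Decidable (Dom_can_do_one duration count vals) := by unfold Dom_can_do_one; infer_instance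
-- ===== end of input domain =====

-- B replaces the per-minute simulation by a closed form: the split threshold duration-count is
-- invariant under splits, so the answer is computed from one pass over vals (objective: faster).
-- Note: Python A sorts/mutates its `vals` argument in place; the equivalence is about the return value only.

-- ===== PORT A =====
def can_do_one (duration : Int) (count : Int) (vals : List Int) : Bool :=
  if _h : 0 < duration then
    let vs := PySem.List.sorted vals (fun x => x) false
    match PySem.List.pyGet? vs (-1) with
    | none => false   -- vals[-1] on empty list: IndexError, excluded by Pre_
    | some m =>
      if duration - count < m then
        can_do_one (duration - 1) (count - 1)
          (vs.dropLast ++ [m - (duration - count), duration - count])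
      else
        can_do_one (duration - 1) count (vs.map (fun x => x - 1))
  else
    (count == 0) &&
      (match PySem.List.max? vals (fun x => x) with
       | some m => decide (m ≤ 0)
       | none => false)   -- max([]) : ValueError, excluded by Pre_
termination_by duration.toNat
decreasing_by all_goals omega

-- ===== PORT B =====
-- sum((v - 1) // t for v in vals if v > 0)
def altNeeded (t : Int) (v : List Int) : Int :=
  ((v.filter (fun x => decide (0 < x))).map (fun x => PySem.Int.floordiv (x - 1) t)).sum

def can_do_one_alt (duration : Int) (count : Int) (vals : List Int) : Bool :=
  if duration ≤ 0 then
    (count == 0) &&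
      (match PySem.List.max? vals (fun x => x) with
       | some m => decide (m ≤ 0)
       | none => false)   -- max([]) : ValueError, excluded by Pre_
  else
    let t := duration - count
    if t ≤ 0 then false
    else
      let needed := altNeeded t vals
      (needed == count) &&
        (match PySem.List.max? (vals.map (fun v => min v t)) (fun x => x) with
         | some m => decide (m ≤ duration - needed)
         | none => false)

-- ===== PRECONDITION & SPEC =====
-- Pre_ excludes exactly the inputs where A raises: empty vals with duration > 0 (IndexError on
-- vals[-1]) or with count == 0 (ValueError on max([])); on empty vals with duration <= 0 and
-- count != 0 Python's `and` short-circuits and A returns False, so that corner stays inside.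
def Pre_can_do_one (duration : Int) (count : Int) (vals : List Int) : Prop :=
  vals ≠ [] ∨ (duration ≤ 0 ∧ count ≠ 0)
instance (duration : Int) (count : Int) (vals : List Int) : Decidable (Pre_can_do_one duration count vals) := by
  unfold Pre_can_do_one; infer_instance

def pvWitness_can_do_one : Int × Int × List Int := (3, 1, [2, 2])

def Spec_can_do_one (duration : Int) (count : Int) (vals : List Int) (out : Bool) : Prop := out = can_do_one_alt duration count vals
instance (duration : Int) (count : Int) (vals : List Int) (out : Bool) : Decidable (Spec_can_do_one duration count vals out) := by unfold Spec_can_do_one; infer_instance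

-- ===== CLAIM (what is proved, stated in full; the proofs are below) =====
def Claim_equal_can_do_one : Prop := ∀ (duration : Int) (count : Int) (vals : List Int), Dom_can_do_one duration count vals → Pre_can_do_one duration count vals → Spec_can_do_one duration count vals (can_do_one duration count vals)

-- ===== LEMMAS AND PROOFS =====

-- characterisation of max? with the identity key: its value is THE maximum
theorem maxId_eq_some_iff (xs : List Int) (m : Int) :
    PySem.List.max? xs (fun x => x) = some m ↔ m ∈ xs ∧ ∀ y ∈ xs, y ≤ m := by
  constructor
  · intro h
    exact ⟨PySem.List.max?_mem h, fun y hy => PySem.List.max?_isMax h y hy⟩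
  · rintro ⟨hm, hmax⟩
    cases hx : PySem.List.max? xs (fun x => x) with
    | none =>
        rw [PySem.List.max?_eq_none_iff] at hx
        subst hx; simp at hm
    | some m' =>
        have h1 := PySem.List.max?_mem hx
        have h2 := PySem.List.max?_isMax hx m hm
        have h3 := hmax m' h1
        have : m' = m := le_antisymm h3 h2
        rw [this]

-- the last element of sorted vals is a maximum of vals
theorem sorted_last_max (v : List Int) (m : Int)
    (h : (PySem.List.sorted v (fun x => x) false).getLast? = some m) :
    m ∈ v ∧ ∀ y ∈ v, y ≤ m := by
  set vs := PySem.List.sorted v (fun x => x) false with hvsdef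
  have hvs : vs ≠ [] := by
    intro hnil; rw [hnil] at h; simp at h
  have hlast : vs.getLast hvs = m := by
    rw [List.getLast?_eq_some_getLast hvs] at h
    exact Option.some.inj h
  have h2 : vs.dropLast ++ [m] = vs := by
    conv_lhs => rw [← hlast]
    exact List.dropLast_concat_getLast hvs
  have hp : vs.Pairwise (fun a b => a ≤ b) := PySem.List.sorted_pairwise v (fun x => x)
  rw [← h2, List.pairwise_append] at hp
  constructor
  · have hmvs : m ∈ vs := by rw [← h2]; simp
    exact (PySem.List.mem_sorted v (fun x => x) false m).mp hmvs
  · intro y hy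
    have hyvs : y ∈ vs := (PySem.List.mem_sorted v (fun x => x) false y).mpr hy
    rw [← h2] at hyvs
    rcases List.mem_append.mp hyvs with h1 | h1
    · exact hp.2.2 y h1 m (by simp)
    · simp at h1; omega

theorem altNeeded_perm (t : Int) {v w : List Int} (p : v.Perm w) :
    altNeeded t v = altNeeded t w := by
  unfold altNeeded
  exact ((p.filter _).map _).sum_eq

theorem altNeeded_append (t : Int) (v w : List Int) :
    altNeeded t (v ++ w) = altNeeded t v + altNeeded t w := by
  unfold altNeeded
  simp

theorem altNeeded_nonneg {t : Int} (ht : 0 < t) (v : List Int) : 0 ≤ altNeeded t v := by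
  apply List.sum_nonneg
  intro x hx
  simp only [List.mem_map, List.mem_filter, decide_eq_true_eq] at hx
  obtain ⟨y, ⟨_, hy⟩, rfl⟩ := hx
  rw [PySem.Int.floordiv_eq_ediv_of_pos ht]
  apply Int.ediv_nonneg <;> omega

theorem altNeeded_small {t : Int} (ht : 0 < t) (v : List Int) (h : ∀ y ∈ v, y ≤ t) :
    altNeeded t v = 0 := by
  apply List.sum_eq_zero
  intro x hx
  simp only [List.mem_map, List.mem_filter, decide_eq_true_eq] at hx
  obtain ⟨y, ⟨hyv, hy⟩, rfl⟩ := hx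
  have hyt := h y hyv
  rw [PySem.Int.floordiv_eq_ediv_of_pos ht]
  exact Int.ediv_eq_zero_of_lt (by omega) (by omega)

theorem altNeeded_singleton (t x : Int) :
    altNeeded t [x] = if 0 < x then PySem.Int.floordiv (x - 1) t else 0 := by
  unfold altNeeded
  by_cases h : 0 < x <;> simp [h]

-- unfoldings of can_do_one_alt in the three regimes
theorem alt_neg (d c : Int) (v : List Int) (hd : d ≤ 0) :
    can_do_one_alt d c v = ((c == 0) &&
      (match PySem.List.max? v (fun x => x) with
       | some m => decide (m ≤ 0)
       | none => false)) := by
  rw [can_do_one_alt, if_pos hd]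

theorem alt_zero (d c : Int) (v : List Int) (hd : 0 < d) (ht : d - c ≤ 0) :
    can_do_one_alt d c v = false := by
  rw [can_do_one_alt, if_neg (by omega : ¬ d ≤ 0)]
  simp only []
  rw [if_pos ht]

theorem alt_pos (d c : Int) (v : List Int) (hd : 0 < d) (ht : ¬ d - c ≤ 0) :
    can_do_one_alt d c v = ((altNeeded (d - c) v == c) &&
      (match PySem.List.max? (v.map (fun x => min x (d - c))) (fun x => x) with
       | some m => decide (m ≤ d - altNeeded (d - c) v)
       | none => false)) := by
  rw [can_do_one_alt, if_neg (by omega : ¬ d ≤ 0)]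
  simp only []
  rw [if_neg ht]

-- B's closed form is invariant under A's split step
theorem alt_split (d c m : Int) (v : List Int)
    (hd : 0 < d) (hm : m ∈ v) (hmax : ∀ y ∈ v, y ≤ m) (hs : d - c < m)
    (w : List Int) (hperm : v.Perm (w ++ [m])) :
    can_do_one_alt d c v = can_do_one_alt (d - 1) (c - 1) (w ++ [m - (d - c), d - c]) := by
  by_cases ht : d - c ≤ 0
  · rw [alt_zero d c v hd ht]
    by_cases hd1 : 0 < d - 1
    · rw [alt_zero _ _ _ hd1 (by omega)]
    · rw [alt_neg _ _ _ (by omega)]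
      by_cases htz : d - c = 0
      · cases hx : PySem.List.max? (w ++ [m - (d - c), d - c]) (fun x => x) with
        | none => simp [PySem.List.max?_eq_none_iff] at hx
        | some mm =>
          have hle := PySem.List.max?_isMax hx (m - (d - c)) (by simp)
          simp only [hx]
          have : decide (mm ≤ 0) = false := by simp; omega
          rw [this, Bool.and_false]
      · have : (c - 1 == 0) = false := by simp; omega
        rw [this, Bool.false_and]
  · replace ht : 0 < d - c := by omega
    have hmt : 0 < m - (d - c) := by omega
    have hf1 : altNeeded (d - c) v = altNeeded (d - c) w + PySem.Int.floordiv (m - 1) (d - c) := by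
      rw [altNeeded_perm _ hperm, altNeeded_append, altNeeded_singleton, if_pos (by omega : (0:Int) < m)]
    have hfms : PySem.Int.floordiv (m - (d - c) - 1) (d - c) = PySem.Int.floordiv (m - 1) (d - c) - 1 := by
      rw [PySem.Int.floordiv_eq_ediv_of_pos ht, PySem.Int.floordiv_eq_ediv_of_pos ht,
          show m - (d - c) - 1 = (m - 1) + (-1) * (d - c) by ring,
          Int.add_mul_ediv_right _ _ (by omega : d - c ≠ 0)]
      ring
    have hft : PySem.Int.floordiv ((d - c) - 1) (d - c) = 0 := by
      rw [PySem.Int.floordiv_eq_ediv_of_pos ht]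
      exact Int.ediv_eq_zero_of_lt (by omega) (by omega)
    have hf2 : altNeeded (d - c) (w ++ [m - (d - c), d - c])
        = altNeeded (d - c) w + (PySem.Int.floordiv (m - 1) (d - c) - 1) := by
      rw [show w ++ [m - (d - c), d - c] = (w ++ [m - (d - c)]) ++ [d - c] by simp,
          altNeeded_append, altNeeded_append, altNeeded_singleton, altNeeded_singleton,
          if_pos (by omega : (0:Int) < m - (d - c)), if_pos (by omega : (0:Int) < d - c), hfms, hft]
      ring
    have hge1 : 1 ≤ PySem.Int.floordiv (m - 1) (d - c) :=
      (PySem.Int.le_floordiv_iff_mul_le ht).mpr (by omega)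
    have hmaxL : PySem.List.max? (v.map (fun x => min x (d - c))) (fun x => x) = some (d - c) := by
      rw [maxId_eq_some_iff]
      refine ⟨List.mem_map.mpr ⟨m, hm, by omega⟩, ?_⟩
      intro y hy
      obtain ⟨z, _, rfl⟩ := List.mem_map.mp hy
      exact min_le_right _ _
    by_cases hd1 : 0 < d - 1
    · have hmaxR : PySem.List.max? ((w ++ [m - (d - c), d - c]).map (fun x => min x (d - c))) (fun x => x)
          = some (d - c) := by
        rw [maxId_eq_some_iff]
        refine ⟨List.mem_map.mpr ⟨d - c, by simp, by omega⟩, ?_⟩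
        intro y hy
        obtain ⟨z, _, rfl⟩ := List.mem_map.mp hy
        exact min_le_right _ _
      rw [alt_pos d c v hd (by omega), alt_pos _ _ _ hd1 (by omega : ¬ (d - 1) - (c - 1) ≤ 0),
          show (d - 1) - (c - 1) = d - c by ring, hmaxL, hmaxR, hf1, hf2]
      rw [Bool.eq_iff_iff]
      simp only [Bool.and_eq_true, beq_iff_eq, decide_eq_true_eq]
      constructor <;> rintro ⟨h1, h2⟩ <;> exact ⟨by omega, by omega⟩
    · have hw0 := altNeeded_nonneg ht w
      rw [alt_pos d c v hd (by omega), alt_neg _ _ _ (by omega), hf1, hmaxL]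
      have hb1 : (altNeeded (d - c) w + PySem.Int.floordiv (m - 1) (d - c) == c) = false := by
        simp; omega
      have hb2 : (c - 1 == 0) = false := by simp; omega
      rw [hb1, hb2, Bool.false_and, Bool.false_and]

-- B's closed form is invariant under A's decrement step
theorem alt_dec (d c m : Int) (v : List Int)
    (hd : 0 < d) (hm : m ∈ v) (hmax : ∀ y ∈ v, y ≤ m) (hs : m ≤ d - c)
    (w : List Int) (hperm : w.Perm v) :
    can_do_one_alt d c v = can_do_one_alt (d - 1) c (w.map (fun x => x - 1)) := by
  by_cases ht : d - c ≤ 0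
  · rw [alt_zero _ _ _ hd ht]
    by_cases hd1 : 0 < d - 1
    · rw [alt_zero _ _ _ hd1 (by omega)]
    · rw [alt_neg _ _ _ (by omega)]
      have : (c == 0) = false := by simp; omega
      rw [this, Bool.false_and]
  · have ht' : 0 < d - c := by omega
    have hneed0 : altNeeded (d - c) v = 0 :=
      altNeeded_small ht' v (fun y hy => le_trans (hmax y hy) hs)
    have hcapL : PySem.List.max? (v.map (fun x => min x (d - c))) (fun x => x) = some m := by
      rw [maxId_eq_some_iff]
      refine ⟨List.mem_map.mpr ⟨m, hm, by omega⟩, ?_⟩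
      intro y hy
      obtain ⟨z, hz, rfl⟩ := List.mem_map.mp hy
      have := hmax z hz
      omega
    have hmw : m ∈ w := hperm.mem_iff.mpr hm
    have hmaxw : ∀ y ∈ w, y ≤ m := fun y hy => hmax y (hperm.subset hy)
    have hmapmax : PySem.List.max? (w.map (fun x => x - 1)) (fun x => x) = some (m - 1) := by
      rw [maxId_eq_some_iff]
      refine ⟨List.mem_map.mpr ⟨m, hmw, by omega⟩, ?_⟩
      intro y hy
      obtain ⟨z, hz, rfl⟩ := List.mem_map.mp hy
      have := hmaxw z hz
      omega
    by_cases hd1 : 0 < d - 1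
    · by_cases ht1 : (d - 1) - c ≤ 0
      · rw [alt_pos _ _ _ hd (by omega), alt_zero _ _ _ hd1 ht1, hneed0, hcapL]
        have : ((0:Int) == c) = false := by simp; omega
        rw [this, Bool.false_and]
      · rw [alt_pos _ _ _ hd (by omega), alt_pos _ _ _ hd1 ht1, hneed0, hcapL]
        have hneed0' : altNeeded ((d - 1) - c) (w.map (fun x => x - 1)) = 0 := by
          apply altNeeded_small (by omega)
          intro y hy
          obtain ⟨z, hz, rfl⟩ := List.mem_map.mp hy
          have := hmaxw z hz
          omega
        have hcapR : PySem.List.max? ((w.map (fun x => x - 1)).map (fun x => min x ((d - 1) - c)))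
            (fun x => x) = some (m - 1) := by
          rw [maxId_eq_some_iff]
          refine ⟨List.mem_map.mpr ⟨m - 1, List.mem_map.mpr ⟨m, hmw, by omega⟩, by omega⟩, ?_⟩
          intro y hy
          obtain ⟨z, hz, rfl⟩ := List.mem_map.mp hy
          obtain ⟨u, hu, rfl⟩ := List.mem_map.mp hz
          have := hmaxw u hu
          omega
        rw [hneed0', hcapR]
        rw [Bool.eq_iff_iff]
        simp only [Bool.and_eq_true, beq_iff_eq, decide_eq_true_eq]
        constructor <;> rintro ⟨h1, h2⟩ <;> exact ⟨by omega, by omega⟩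
    · rw [alt_pos _ _ _ hd (by omega), alt_neg _ _ _ (by omega), hneed0, hcapL, hmapmax]
      rw [Bool.eq_iff_iff]
      simp only [Bool.and_eq_true, beq_iff_eq, decide_eq_true_eq]
      constructor <;> rintro ⟨h1, h2⟩ <;> exact ⟨by omega, by omega⟩

theorem final_eq (d c : Int) (v : List Int) (hd : ¬ 0 < d) :
    can_do_one d c v = can_do_one_alt d c v := by
  rw [can_do_one]
  simp only [dif_neg hd]
  rw [can_do_one_alt, if_pos (by omega : d ≤ 0)]

theorem main_eq (n : Nat) : ∀ (d c : Int) (v : List Int), d.toNat ≤ n → v ≠ [] →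
    can_do_one d c v = can_do_one_alt d c v := by
  induction n with
  | zero =>
      intro d c v hd _
      exact final_eq d c v (by omega)
  | succ n ih =>
      intro d c v hd hv
      by_cases h : 0 < d
      · have hvs : PySem.List.sorted v (fun x => x) false ≠ [] := by
          rw [Ne, PySem.List.sorted_eq_nil_iff]; exact hv
        obtain ⟨m, hm⟩ : ∃ m, (PySem.List.sorted v (fun x => x) false).getLast? = some m := by
          cases hx : (PySem.List.sorted v (fun x => x) false).getLast? with
          | none => exact absurd (List.getLast?_eq_none_iff.mp hx) hvs
          | some m => exact ⟨m, rfl⟩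
        obtain ⟨hmem, hmax⟩ := sorted_last_max v m hm
        rw [can_do_one]
        simp only [dif_pos h, PySem.List.pyGet?_neg_one, hm]
        by_cases hsplit : d - c < m
        · rw [if_pos hsplit]
          rw [ih (d - 1) (c - 1) _ (by omega) (by simp)]
          have hlast : (PySem.List.sorted v (fun x => x) false).getLast hvs = m := by
            rw [List.getLast?_eq_some_getLast hvs] at hm
            exact Option.some.inj hm
          have h2 : (PySem.List.sorted v (fun x => x) false).dropLast ++ [m] =
              PySem.List.sorted v (fun x => x) false := by
            conv_lhs => rw [← hlast]
            exact List.dropLast_concat_getLast hvs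
          refine (alt_split d c m v h hmem hmax hsplit _ ?_).symm
          rw [h2]
          exact (PySem.List.sorted_perm v (fun x => x) false).symm
        · rw [if_neg hsplit]
          have hvne : (PySem.List.sorted v (fun x => x) false).map (fun x => x - 1) ≠ [] := by
            simpa using hvs
          rw [ih (d - 1) c _ (by omega) hvne]
          exact (alt_dec d c m v h hmem hmax (by omega) _ (PySem.List.sorted_perm v (fun x => x) false)).symm
      · exact final_eq d c v h

-- ===== VERDICT (by name: the statement is the Claim_ definition above) =====
theorem can_do_one_spec : Claim_equal_can_do_one := by
  intro d c v _ hpre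
  unfold Spec_can_do_one
  rcases hpre with hv | ⟨hd, hc⟩
  · exact main_eq d.toNat d c v le_rfl hv
  · rw [can_do_one]
    rw [can_do_one_alt, if_pos hd]
    simp [show ¬ 0 < d by omega]
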